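-- pv_equiv track=rewrite | github.com/BastienMonet/TestSAE | histoire2foot.py | fusionner_matchs
-- ===== SOURCE A (Python) =====
-- def fusionner_matchs(liste_matchs1, liste_matchs2):
--     """Fusionne deux listes de matchs triées sans doublons en une liste triée sans doublon
--     sachant qu'un même match peut être présent dans les deux listes
--
--     Args:
--         liste_matchs1 (list): la première liste de matchs
--         liste_matchs2 (list): la seconde liste de matchs
--
--     Returns:
--         list: la liste triée sans doublon comportant tous les matchs de liste_matchs1 et liste_matchs2
--     """
--     res=[]
--     ind1 = 0
--     ind2 = 0
--     while ind1 < len(liste_matchs1) and ind2 < len(liste_matchs2) :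
--         if liste_matchs1[ind1] < liste_matchs2[ind2]:
--             if liste_matchs1[ind1] not in res:
--                 res.append(liste_matchs1[ind1])
--             ind1+=1
--         else:
--             if liste_matchs2[ind2] not in res:
--                 res.append(liste_matchs2[ind2])
--             ind2+=1
--
--     if ind1 < len(liste_matchs1):
--         while ind1 < len(liste_matchs1):
--             if liste_matchs1[ind1] not in res:
--                 res.append(liste_matchs1[ind1])
--             ind1+=1
--
--
--     if ind2 < len(liste_matchs2):
--         while ind2 < len(liste_matchs2):
--             if liste_matchs2[ind2] not in res:
--                 res.append(liste_matchs2[ind2])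
--             ind2+=1
--     return res
-- ===== SOURCE B (Python) =====
-- def fusionner_matchs(liste_matchs1, liste_matchs2):
--     """Fusionne deux listes de matchs triees sans doublons en une liste triee sans doublon."""
--     merged = []
--     i = 0
--     j = 0
--     while i < len(liste_matchs1) and j < len(liste_matchs2):
--         if liste_matchs1[i] < liste_matchs2[j]:
--             merged.append(liste_matchs1[i])
--             i += 1
--         else:
--             merged.append(liste_matchs2[j])
--             j += 1
--     merged.extend(liste_matchs1[i:])
--     merged.extend(liste_matchs2[j:])
--     return list(dict.fromkeys(merged))
-- ===== Notes on version B (the rewrite author's own statement) =====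
-- stated objective: faster
-- what changed: B first builds the plain merge interleaving without any membership test, then removes duplicates in one pass with dict.fromkeys (first occurrences), so A's linear 'not in res' scan inside every loop iteration disappears.
import Mathlib
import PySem

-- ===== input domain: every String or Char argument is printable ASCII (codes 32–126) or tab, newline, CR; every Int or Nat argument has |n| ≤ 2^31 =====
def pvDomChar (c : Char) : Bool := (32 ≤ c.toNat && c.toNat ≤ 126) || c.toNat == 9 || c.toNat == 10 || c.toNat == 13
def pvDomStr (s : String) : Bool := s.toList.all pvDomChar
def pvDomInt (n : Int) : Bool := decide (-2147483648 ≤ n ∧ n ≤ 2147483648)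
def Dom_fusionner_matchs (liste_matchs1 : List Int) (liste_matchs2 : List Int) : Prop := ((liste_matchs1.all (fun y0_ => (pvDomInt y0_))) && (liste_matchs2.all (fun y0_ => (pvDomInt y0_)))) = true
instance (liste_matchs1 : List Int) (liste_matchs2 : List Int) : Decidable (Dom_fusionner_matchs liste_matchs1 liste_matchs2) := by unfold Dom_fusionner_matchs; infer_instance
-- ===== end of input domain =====

-- B replaces A's per-element 'not in res' scan by a plain merge pass followed by one
-- dict.fromkeys first-occurrence dedup pass (asymptotically faster); return values proved equal on all inputs.

-- ===== PORT A =====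
-- A: merge walk over the two lists, appending each taken element only if it is
-- not already anywhere in res ('not in res'), then the two drain loops.
def fmDrain (res : List Int) (xs : List Int) : List Int :=
  xs.foldl (fun r x => if r.contains x then r else r ++ [x]) res

def fmMain : List Int → List Int → List Int → List Int
  | res, x :: xs, y :: ys =>
      if x < y then fmMain (if res.contains x then res else res ++ [x]) xs (y :: ys)
      else fmMain (if res.contains y then res else res ++ [y]) (x :: xs) ys
  | res, xs, ys => fmDrain (fmDrain res xs) ys

def fusionner_matchs (liste_matchs1 : List Int) (liste_matchs2 : List Int) : List Int :=
  fmMain [] liste_matchs1 liste_matchs2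

-- ===== PORT B =====
-- B: plain merge interleaving (no membership tests), then list(dict.fromkeys(..))
-- = PySem.List.dedup, one ordered first-occurrence dedup pass.
def fmMerge : List Int → List Int → List Int
  | [], ys => ys
  | x :: xs, [] => x :: xs
  | x :: xs, y :: ys =>
      if x < y then x :: fmMerge xs (y :: ys) else y :: fmMerge (x :: xs) ys

def fusionner_matchs_alt (liste_matchs1 : List Int) (liste_matchs2 : List Int) : List Int :=
  PySem.List.dedup (fmMerge liste_matchs1 liste_matchs2)

-- ===== PRECONDITION & SPEC =====
def Spec_fusionner_matchs (liste_matchs1 : List Int) (liste_matchs2 : List Int) (out : List Int) : Prop := out = fusionner_matchs_alt liste_matchs1 liste_matchs2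
instance (liste_matchs1 : List Int) (liste_matchs2 : List Int) (out : List Int) : Decidable (Spec_fusionner_matchs liste_matchs1 liste_matchs2 out) := by unfold Spec_fusionner_matchs; infer_instance

-- ===== CLAIM (what is proved, stated in full; the proofs are below) =====
def Claim_equal_fusionner_matchs : Prop := ∀ (liste_matchs1 : List Int) (liste_matchs2 : List Int), Dom_fusionner_matchs liste_matchs1 liste_matchs2 → Spec_fusionner_matchs liste_matchs1 liste_matchs2 (fusionner_matchs liste_matchs1 liste_matchs2)

-- ===== LEMMAS AND PROOFS =====

theorem fmAddIf (r : List Int) (x : Int) :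
    (if r.contains x then r else r ++ [x]) = PySem.Set.add r x := by
  simp [PySem.Set.add, PySem.Set.contains]

theorem fmDrain_eq_foldl_add (res xs : List Int) :
    fmDrain res xs = xs.foldl PySem.Set.add res := by
  induction xs generalizing res with
  | nil => rfl
  | cons x xs ih => rw [fmDrain, List.foldl_cons, List.foldl_cons, fmAddIf, ← fmDrain, ih]

theorem fmMain_eq (xs ys res : List Int) :
    fmMain res xs ys = (fmMerge xs ys).foldl PySem.Set.add res := by
  fun_induction fmMain res xs ys with
  | case1 res x xs y ys h ih =>
      simp only [dite_eq_ite] at ih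
      rw [fmMerge, if_pos h, List.foldl_cons, ih, fmAddIf]
  | case2 res x xs y ys h ih =>
      simp only [dite_eq_ite] at ih
      rw [fmMerge, if_neg h, List.foldl_cons, ih, fmAddIf]
  | case3 res xs ys h =>
      cases xs with
      | nil =>
          rw [show fmMerge [] ys = ys from by cases ys <;> simp [fmMerge]]
          show fmDrain res ys = _
          exact fmDrain_eq_foldl_add res ys
      | cons x xs =>
          cases ys with
          | nil =>
              show fmDrain (fmDrain res (x :: xs)) [] = _
              rw [show fmMerge (x :: xs) [] = x :: xs from by simp [fmMerge]]
              show fmDrain res (x :: xs) = _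
              exact fmDrain_eq_foldl_add res (x :: xs)
          | cons y ys => exact (h x xs y ys rfl rfl).elim

-- ===== VERDICT (by name: the statement is the Claim_ definition above) =====
theorem fusionner_matchs_spec : Claim_equal_fusionner_matchs := by
  intro l1 l2 _
  unfold Spec_fusionner_matchs fusionner_matchs fusionner_matchs_alt
  rw [fmMain_eq, PySem.List.dedup_eq_ofList, PySem.Set.ofList_eq_foldl]
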